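-- pv_equiv track=rewrite | github.com/rgrindle/y2eq | src/srvgd/data_gathering/rebuild_dataset_2d.py | strip_x
-- ===== SOURCE A (Python) =====
-- def find_var_x(eq):
--     indices = []
--     for i, token in enumerate(eq):
--         if token == 'x':
--             if 0 < i < len(eq)-1:
--                 if eq[i-1:i+2] != 'exp':
--                     indices.append(i)
--             else:
--                 indices.append(i)
--     return indices
--
-- def strip_x(eq):
--     indices = find_var_x(eq)
--     stripped_eq_list = []
--     start = 0
--     for i in indices:
--         if start != i:
--             stripped_eq_list.append(eq[start:i])
--         start = i+1
--     if start < len(eq):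
--         stripped_eq_list.append(eq[start:])
--     return stripped_eq_list
-- ===== SOURCE B (Python) =====
-- def strip_x(eq):
--     # One pass with an accumulator buffer: flush the buffer at each delimiter
--     # 'x' (an 'x' that is not the middle of 'exp'), instead of collecting
--     # indices first and slicing afterwards.
--     parts = []
--     buf = ''
--     prev = ''
--     for i, ch in enumerate(eq):
--         if ch == 'x' and not (prev == 'e' and eq[i+1:i+2] == 'p'):
--             if buf:
--                 parts.append(buf)
--             buf = ''
--         else:
--             buf += ch
--         prev = ch
--     if buf:
--         parts.append(buf)
--     return parts
-- ===== Notes on version B (the rewrite author's own statement) =====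
-- stated objective: simpler
-- what changed: Replaced A's two-pass approach (collect all delimiter indices with find_var_x, then re-slice the string between consecutive indices) by a single pass that grows a character buffer and flushes it at each variable-x delimiter (an x character not forming the middle of an exp token).
import Mathlib
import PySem

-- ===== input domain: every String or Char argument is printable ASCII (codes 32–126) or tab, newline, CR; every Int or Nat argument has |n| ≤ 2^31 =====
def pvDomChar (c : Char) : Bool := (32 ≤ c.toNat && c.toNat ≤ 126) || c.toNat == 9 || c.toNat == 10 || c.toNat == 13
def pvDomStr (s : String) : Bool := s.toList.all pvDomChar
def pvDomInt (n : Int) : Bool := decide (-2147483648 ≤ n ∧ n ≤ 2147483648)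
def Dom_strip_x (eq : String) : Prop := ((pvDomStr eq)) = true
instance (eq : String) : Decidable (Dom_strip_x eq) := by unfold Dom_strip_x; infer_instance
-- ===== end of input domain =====

-- B replaces A's two-pass index-collection-then-slicing by a single pass with an
-- accumulator buffer flushed at each delimiter 'x' (objective: simpler, same cost).


-- ===== PORT A =====
-- loop body of find_var_x's for-loop (helper of A)
def aBody (eq : List Char) (indices : List Int) (p : Int × Char) : List Int :=
  if p.2 = 'x' then
    if 0 < p.1 ∧ p.1 < (eq.length : Int) - 1 then
      if PySem.List.slice eq (some (p.1 - 1)) (some (p.1 + 2)) ≠ ['e', 'x', 'p'] then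
        indices ++ [p.1]
      else indices
    else indices ++ [p.1]
  else indices

def find_var_x (eq : List Char) : List Int :=
  (PySem.List.enumerate eq 0).foldl (aBody eq) []

-- loop body of strip_x's for-loop over the indices (state = (start, stripped_eq_list))
def a2Body (cs : List Char) (st : Int × List String) (i : Int) : Int × List String :=
  if st.1 ≠ i then
    (i + 1, st.2 ++ [String.ofList (PySem.List.slice cs (some st.1) (some i))])
  else (i + 1, st.2)

def strip_x (eq : String) : List String :=
  let cs := eq.toList
  let indices := find_var_x cs
  let st := indices.foldl (a2Body cs) (0, [])
  if st.1 < (cs.length : Int) then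
    st.2 ++ [String.ofList (PySem.List.slice cs (some st.1) none)]
  else st.2

-- ===== PORT B =====
-- loop body of B's single pass (state = (parts, buf, prev))
def bBody (cs : List Char) (st : List String × List Char × List Char) (p : Int × Char) :
    List String × List Char × List Char :=
  if p.2 = 'x' ∧ ¬(st.2.2 = ['e'] ∧ PySem.List.slice cs (some (p.1 + 1)) (some (p.1 + 2)) = ['p']) then
    ((if st.2.1 ≠ [] then st.1 ++ [String.ofList st.2.1] else st.1), [], [p.2])
  else (st.1, st.2.1 ++ [p.2], [p.2])

def strip_x_alt (eq : String) : List String :=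
  let cs := eq.toList
  let st := (PySem.List.enumerate cs 0).foldl (bBody cs) ([], [], [])
  if st.2.1 ≠ [] then st.1 ++ [String.ofList st.2.1] else st.1

-- ===== PRECONDITION & SPEC =====
def Spec_strip_x (eq : String) (out : List String) : Prop := out = strip_x_alt eq
instance (eq : String) (out : List String) : Decidable (Spec_strip_x eq out) := by unfold Spec_strip_x; infer_instance

-- ===== CLAIM (what is proved, stated in full; the proofs are below) =====
def Claim_equal_strip_x : Prop := ∀ (eq : String), Dom_strip_x eq → Spec_strip_x eq (strip_x eq)

-- ===== LEMMAS AND PROOFS =====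

-- position k of cs is a delimiter 'x' (an 'x' not the middle of an 'exp')
def isDelim (cs : List Char) (k : Nat) : Bool :=
  cs[k]? == some 'x' && !(k != 0 && cs[k-1]? == some 'e' && cs[k+1]? == some 'p')

-- reference splitter: remaining fuel m, current position k, current buffer buf
def gAux (cs : List Char) : Nat → Nat → List Char → List String
  | 0, _, buf => if buf = [] then [] else [String.ofList buf]
  | m+1, k, buf =>
    if isDelim cs k then
      (if buf = [] then [] else [String.ofList buf]) ++ gAux cs m (k+1) []
    else
      gAux cs m (k+1) (buf ++ [cs[k]?.getD ' '])

theorem aBody_eq (cs : List Char) (k : Nat) (hk : k < cs.length) (acc : List Int) :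
    aBody cs acc ((k : Int), cs[k]) = if isDelim cs k then acc ++ [(k : Int)] else acc := by
  have hget : cs[k]? = some cs[k] := List.getElem?_eq_getElem hk
  unfold aBody isDelim
  by_cases hx : cs[k] = 'x'
  · by_cases h1 : 0 < (k : Int) ∧ (k : Int) < (cs.length : Int) - 1
    · have hk0 : 0 < k := by have := h1.1; omega
      have hk1 : k + 1 < cs.length := by have := h1.2; omega
      rw [if_pos hx, if_pos h1]
      have e1 : (k : Int) - 1 = ((k - 1 : Nat) : Int) := by omega
      have e2 : (k : Int) + 2 = ((k + 2 : Nat) : Int) := by omega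
      rw [e1, e2, PySem.List.slice_natCast]
      have hd : cs.drop (k - 1) = cs[k-1] :: cs[k] :: cs[k+1] :: cs.drop (k + 2) := by
        rw [List.drop_eq_getElem_cons (show k - 1 < cs.length by omega)]
        rw [show k - 1 + 1 = k by omega,
          List.drop_eq_getElem_cons (show k < cs.length by omega)]
        rw [show k + 1 + 1 = k + 2 by omega,
          List.drop_eq_getElem_cons (show k + 1 < cs.length by omega)]
      rw [hd, show k + 2 - (k - 1) = 3 by omega]
      by_cases hc : cs[k-1] = 'e' ∧ cs[k+1] = 'p'
      · simp [hc.1, hc.2, hx, hget, show k - 1 < cs.length by omega, hk1]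
        omega
      · have hne : ¬ ([cs[k-1], cs[k], cs[k+1]] = ['e', 'x', 'p']) := by
          simp only [List.cons.injEq, and_true]; tauto
        simp only [List.take_succ_cons, List.take_zero, ne_eq, hne, not_false_iff, if_true]
        have : isDelim cs k = true := by
          unfold isDelim
          simp [hget, hx, show k - 1 < cs.length by omega, hk1]
          tauto
        unfold isDelim at this
        rw [if_pos this]
    · rw [if_pos hx, if_neg h1]
      have h2 : k = 0 ∨ ¬ k + 1 < cs.length := by
        rcases not_and_or.mp h1 with h | h
        · left; omega
        · right; intro hc; exact h (by omega)
      rcases h2 with h2 | h2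
      · subst h2; simp [hget, hx]
      · have : cs[k+1]? = none := List.getElem?_eq_none (by omega)
        simp [this, hget, hx]
  · simp [hx, hget]

theorem find_var_x_eq (cs : List Char) :
    ∀ (m k : Nat) (acc : List Int), cs.length - k = m →
      (PySem.List.enumerate (cs.drop k) (k : Int)).foldl (aBody cs) acc =
        acc ++ (((List.range' k m).filter (isDelim cs)).map (Nat.cast : Nat → Int)) := by
  intro m
  induction m with
  | zero =>
    intro k acc hm
    rw [List.drop_eq_nil_of_le (by omega)]
    simp [PySem.List.enumerate_nil]
  | succ m ih =>
    intro k acc hm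
    have hk : k < cs.length := by omega
    rw [List.drop_eq_getElem_cons hk, PySem.List.enumerate_cons, List.foldl_cons,
      aBody_eq cs k hk, List.range'_succ, List.filter_cons]
    rw [show (k : Int) + 1 = ((k + 1 : Nat) : Int) by push_cast; ring]
    by_cases hd : isDelim cs k = true
    · rw [if_pos hd, ih (k + 1) _ (by omega)]
      simp [hd]
    · rw [if_neg hd, ih (k + 1) _ (by omega)]
      simp [hd]

-- the tail of strip_x after phase 1: fold phase 2 then the final flush
def afinish (cs : List Char) (idxs : List Int) (st : Int × List String) : List String :=
  let r := idxs.foldl (a2Body cs) st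
  if r.1 < (cs.length : Int) then
    r.2 ++ [String.ofList (PySem.List.slice cs (some r.1) none)]
  else r.2

theorem afinish_cons (cs : List Char) (i : Int) (idxs : List Int) (st : Int × List String) :
    afinish cs (i :: idxs) st = afinish cs idxs (a2Body cs st i) := rfl

theorem afinish_eq (cs : List Char) :
    ∀ (m k start : Nat) (out : List String), cs.length - k = m → k ≤ cs.length → start ≤ k →
      afinish cs (((List.range' k m).filter (isDelim cs)).map (Nat.cast : Nat → Int))
          ((start : Int), out) =
        out ++ gAux cs m k ((cs.drop start).take (k - start)) := by
  intro m
  induction m with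
  | zero =>
    intro k start out hm hkn hs
    have hk : k = cs.length := by omega
    subst hk
    unfold afinish
    simp only [List.range'_zero, List.filter_nil, List.map_nil, List.foldl_nil]
    rw [PySem.List.slice_from_natCast]
    have hbuf : (cs.drop start).take (cs.length - start) = cs.drop start :=
      List.take_of_length_le (by simp)
    rw [hbuf]
    by_cases h : start < cs.length
    · rw [if_pos (by exact_mod_cast h)]
      have hne : cs.drop start ≠ [] := by
        intro hc
        have := congrArg List.length hc
        simp at this; omega
      simp [gAux, hne]
    · have hse : start = cs.length := by omega
      rw [if_neg (by exact_mod_cast h)]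
      subst hse
      simp [gAux]
  | succ m ih =>
    intro k start out hm hkn hs
    have hk : k < cs.length := by omega
    rw [List.range'_succ, List.filter_cons]
    by_cases hd : isDelim cs k = true
    · rw [if_pos hd]
      simp only [List.map_cons]
      rw [afinish_cons]
      unfold a2Body
      simp only
      rw [PySem.List.slice_natCast,
        show (k : Int) + 1 = ((k + 1 : Nat) : Int) by push_cast; ring]
      by_cases hsk : start = k
      · subst hsk
        rw [if_neg (by simp)]
        rw [ih (start + 1) (start + 1) out (by omega) (by omega) le_rfl]
        simp [gAux, hd]
      · have hlt : start < k := by omega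
        rw [if_pos (by simpa using fun hc => hsk (by exact_mod_cast hc))]
        rw [ih (k + 1) (k + 1) _ (by omega) (by omega) le_rfl]
        have hne : (cs.drop start).take (k - start) ≠ [] := by
          intro hc
          have := congrArg List.length hc
          simp at this; omega
        simp [gAux, hd, hne]
    · rw [if_neg hd]
      rw [ih (k + 1) start out (by omega) (by omega) (by omega)]
      have hstep : (cs.drop start).take (k - start) ++ [cs[k]?.getD ' '] =
          (cs.drop start).take (k + 1 - start) := by
        rw [show k + 1 - start = (k - start) + 1 by omega, List.take_add_one]
        have : (cs.drop start)[k - start]? = some cs[k] := by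
          rw [List.getElem?_drop, show start + (k - start) = k by omega]
          exact List.getElem?_eq_getElem hk
        simp [this, List.getElem?_eq_getElem hk]
      rw [← hstep]
      simp [gAux, hd]

def bfinish (cs : List Char) (l : List (Int × Char)) (st : List String × List Char × List Char) :
    List String :=
  let r := l.foldl (bBody cs) st
  if r.2.1 ≠ [] then r.1 ++ [String.ofList r.2.1] else r.1

theorem bfinish_cons (cs : List Char) (p : Int × Char) (l : List (Int × Char))
    (st : List String × List Char × List Char) :
    bfinish cs (p :: l) st = bfinish cs l (bBody cs st p) := rfl

theorem bfinish_eq (cs : List Char) :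
    ∀ (m k : Nat) (parts : List String) (buf prev : List Char), cs.length - k = m →
      (prev = ['e'] ↔ (0 < k ∧ cs[k-1]? = some 'e')) →
      bfinish cs (PySem.List.enumerate (cs.drop k) (k : Int)) (parts, buf, prev) =
        parts ++ gAux cs m k buf := by
  intro m
  induction m with
  | zero =>
    intro k parts buf prev hm hprev
    rw [List.drop_eq_nil_of_le (by omega)]
    unfold bfinish
    simp only [PySem.List.enumerate_nil, List.foldl_nil]
    by_cases hb : buf = [] <;> simp [gAux, hb]
  | succ m ih =>
    intro k parts buf prev hm hprev
    have hk : k < cs.length := by omega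
    have hget : cs[k]? = some cs[k] := List.getElem?_eq_getElem hk
    rw [List.drop_eq_getElem_cons hk, PySem.List.enumerate_cons, bfinish_cons]
    have hs1 : PySem.List.slice cs (some ((k : Int) + 1)) (some ((k : Int) + 2)) =
        (cs.drop (k + 1)).take 1 := by
      rw [show (k : Int) + 1 = ((k + 1 : Nat) : Int) by push_cast; ring,
        show (k : Int) + 2 = ((k + 2 : Nat) : Int) by push_cast; ring,
        PySem.List.slice_natCast, show k + 2 - (k + 1) = 1 by omega]
    have hnext : ((cs.drop (k + 1)).take 1 = ['p']) ↔ cs[k+1]? = some 'p' := by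
      by_cases h : k + 1 < cs.length
      · have h1 : (cs.drop (k + 1)).take 1 = [cs[k+1]] := by
          rw [List.drop_eq_getElem_cons h]; rfl
        rw [h1, List.getElem?_eq_getElem h]
        simp
      · rw [List.drop_eq_nil_of_le (by omega), List.getElem?_eq_none (by omega)]
        simp
    have hcond : (cs[k] = 'x' ∧
        ¬(prev = ['e'] ∧ PySem.List.slice cs (some ((k : Int) + 1)) (some ((k : Int) + 2)) = ['p']))
        ↔ isDelim cs k = true := by
      rw [hs1, hnext, hprev]
      unfold isDelim
      rcases Nat.eq_zero_or_pos k with h0 | h0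
      · subst h0; simp [hget]
      · have h0' : ¬ k = 0 := by omega
        simp [hget, h0, h0']
        tauto
    have hprev' : ([cs[k]] = ['e'] ↔ (0 < k + 1 ∧ cs[k+1-1]? = some 'e')) := by
      simp [hget]
    simp only [bBody]
    by_cases hd : isDelim cs k = true
    · rw [if_pos (hcond.mpr hd),
        show (k : Int) + 1 = ((k + 1 : Nat) : Int) by push_cast; ring,
        ih (k + 1) _ [] [cs[k]] (by omega) hprev']
      by_cases hb : buf = [] <;> simp [gAux, hd, hb]
    · rw [if_neg (fun hc => hd (hcond.mp hc)),
        show (k : Int) + 1 = ((k + 1 : Nat) : Int) by push_cast; ring,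
        ih (k + 1) _ _ [cs[k]] (by omega) hprev']
      simp [gAux, hd, hget]

-- ===== VERDICT (by name: the statement is the Claim_ definition above) =====
theorem strip_x_spec : Claim_equal_strip_x := by
  intro eq _
  unfold Spec_strip_x
  have hA : strip_x eq = afinish eq.toList (find_var_x eq.toList) (0, []) := rfl
  have hB : strip_x_alt eq =
      bfinish eq.toList (PySem.List.enumerate eq.toList 0) ([], [], []) := rfl
  rw [hA, hB]
  have hFV : find_var_x eq.toList =
      ((List.range' 0 eq.toList.length).filter (isDelim eq.toList)).map (Nat.cast : Nat → Int) := by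
    unfold find_var_x
    have h := find_var_x_eq eq.toList eq.toList.length 0 [] (by omega)
    simpa using h
  have hAf := afinish_eq eq.toList eq.toList.length 0 0 [] (by omega) (by omega) (by omega)
  have hBf := bfinish_eq eq.toList eq.toList.length 0 [] [] [] (by omega) (by simp)
  rw [hFV]
  simp only [Nat.cast_zero, List.drop_zero, Nat.sub_zero, List.nil_append] at hAf hBf
  rw [hAf, hBf]
  simp
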